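-- pv_equiv track=rewrite | github.com/ido-akov/HUJI-code | Desktop/idostuf/HUJI/code/PycharmProjects/intro/for git/ex5/wordsearch.py | search_loop
-- ===== SOURCE A (Python) =====
-- from copy import deepcopy
--
-- def get_all_substrings(input_string):
--     """
--     helper function to helper function:
--     receives string, returns all substrings
--     """
--     length = len(input_string)
--     return [input_string[i:j + 1] for i in range(length) for j in range(i, length)]  # list comprehension
--
-- def compare_words(dictionary, matrix):
--     """
--     helper function:
--     receives dictionary with items (word, count), receives 2-d rectangular matrix as list of lists
--     returns dictionary with updated values according to search within matrix
--     """
--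
--     for m in matrix:
--         for s in get_all_substrings(''.join(m)):  #convert mth list in matrix to string of letters
--             if s in dictionary.keys():
--                 dictionary[s] += 1
--     return dictionary  #updated values in dictionary
--
-- def down_search(matrix):
--     """
--     :param 2-d rectangular matrix as list of lists,
--     :returns matrix transposed
--     """
--     new_list = []
--     try:
--         for i in range(len(matrix[0])):  # same length for every row
--             y = list()
--             for m in matrix:
--                 y.append(m[i])
--             new_list.append(y)
--         return new_list
--     except IndexError:  # if empty matrix received as parameter, skip computation and return []
--         return []
--
-- def reverse(matrix):
--     """
--     :param: 2-d rectangular matrix as list of lists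
--     :returns: matrix with reversed rows
--     """
--     new_list = deepcopy(matrix)
--     for i in new_list:
--         i.reverse()
--     return new_list
--
-- def get_rows(matrix):
--     """
--     receives 2-d matrix, returns copy of matrix
--     """
--     return [[c for c in r] for r in matrix]
--
-- def diagonal_search(matrix):
--     """
--     :param 2-d rectangular matrix as list of lists
--     :returns: matrix with diagonals from top left downwards
--     """
--     if len(matrix) == 1:  # if one-row matrix- return original row
--         return matrix
--     else:
--         b = [None] * (len(matrix) - 1)  # create new row with empty lists
--         matrix = [b[:i] + r + b[i:] for i, r in enumerate(get_rows(matrix))]  # create new larger matrix with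
--         # empty cells on sides of each line in order to search down each column and get diagonals
--         return [[c for c in r if c is not None] for r in down_search(matrix)]  # search down columns for non-empty lists
--
-- def search_loop(dictionary, matrix, directions):
--     """
--     receives dictionary with items (word, count), receives 2-d rectangular matrix as list of lists,
--     receives string of chars specifying search direction
--     :return: dictionary with updated values
--     """
--
--     for d in directions:  #iterate over string with chars specifying search directions
--         if d == 'r':
--             dictionary.update(compare_words(dictionary, matrix))
--         if d == 'l':
--             dictionary.update(compare_words(dictionary, reverse(matrix)))
--         if d == 'd':
--             dictionary.update(compare_words(dictionary, down_search(matrix)))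
--         if d == 'u':
--             dictionary.update(compare_words(dictionary, reverse(down_search(matrix))))
--         if d == 'w':
--             dictionary.update(compare_words(dictionary, reverse(diagonal_search(matrix))))
--         if d == 'x':
--             dictionary.update(compare_words(dictionary, reverse(diagonal_search(reverse(matrix)))))  #
--         if d == 'y':
--             dictionary.update(compare_words(dictionary, diagonal_search(reverse(matrix))))
--         if d == 'z':
--             dictionary.update(compare_words(dictionary,diagonal_search(matrix)))
--     return dictionary
-- ===== SOURCE B (Python) =====
-- def transpose(m):
--     """Transpose; a ragged matrix (some row shorter than the first) yields []."""
--     if not m or any(len(r) < len(m[0]) for r in m):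
--         return []
--     return [[r[i] for r in m] for i in range(len(m[0]))]
--
-- def diagonals(m):
--     """Top-left-downward diagonals, via the shifted-rows trick; one-row matrices stay as is."""
--     if len(m) == 1:
--         return m
--     pad = [None] * (len(m) - 1)
--     shifted = [pad[:i] + r + pad[i:] for i, r in enumerate(m)]
--     return [[c for c in col if c is not None] for col in transpose(shifted)]
--
-- def rows_for(matrix, d):
--     if d == 'r':
--         return matrix
--     elif d == 'l':
--         return [r[::-1] for r in matrix]
--     elif d == 'd':
--         return transpose(matrix)
--     elif d == 'u':
--         return [r[::-1] for r in transpose(matrix)]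
--     elif d == 'w':
--         return [r[::-1] for r in diagonals(matrix)]
--     elif d == 'x':
--         return [r[::-1] for r in diagonals([r[::-1] for r in matrix])]
--     elif d == 'y':
--         return diagonals([r[::-1] for r in matrix])
--     elif d == 'z':
--         return diagonals(matrix)
--     return []
--
-- def count_occ(w, s):
--     """Occurrences of the non-empty word w in s, counted by start position (overlaps allowed)."""
--     n = 0
--     for i in range(len(s) - len(w) + 1):
--         if s[i:i + len(w)] == w:
--             n += 1
--     return n
--
-- def search_loop(dictionary, matrix, directions):
--     rows = [''.join(r) for d in directions for r in rows_for(matrix, d)]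
--     for w in dictionary:
--         if w:
--             dictionary[w] += sum(count_occ(w, s) for s in rows)
--     return dictionary
-- ===== Notes on version B (the rewrite author's own statement) =====
-- stated objective: faster
-- what changed: Instead of materialising all O(L^2) substrings of every row for every direction and testing each against the dict, B collects the row strings of all requested directions once and then, in a single pass over the dictionary keys, adds for each word its occurrence count obtained by a direct sliding-window scan of each row; the transpose is a bounds-checked comprehension instead of append loops under try/except.
import Mathlib
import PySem

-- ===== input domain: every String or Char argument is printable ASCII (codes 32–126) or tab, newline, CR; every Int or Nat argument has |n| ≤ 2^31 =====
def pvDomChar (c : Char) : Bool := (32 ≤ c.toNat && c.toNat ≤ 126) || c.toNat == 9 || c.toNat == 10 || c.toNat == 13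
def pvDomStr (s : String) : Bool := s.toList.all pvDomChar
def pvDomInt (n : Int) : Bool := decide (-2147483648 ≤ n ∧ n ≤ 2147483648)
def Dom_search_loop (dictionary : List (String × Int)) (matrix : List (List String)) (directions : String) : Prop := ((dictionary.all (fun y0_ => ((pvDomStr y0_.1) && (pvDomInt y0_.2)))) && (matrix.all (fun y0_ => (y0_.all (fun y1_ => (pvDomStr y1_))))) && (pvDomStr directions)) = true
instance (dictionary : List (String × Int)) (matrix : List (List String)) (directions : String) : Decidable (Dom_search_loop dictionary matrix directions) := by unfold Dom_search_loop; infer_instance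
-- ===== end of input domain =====

-- B replaces A's per-direction enumeration of all row substrings (tested one by one against
-- the dict) by one pass over the dictionary keys with a direct sliding-window occurrence count
-- per row string; objective: faster.  Python A mutates the dict argument in place (B does the
-- same); the equivalence proved here is about the returned association list.

-- ===== PORT A =====
-- get_all_substrings: [input_string[i:j+1] for i in range(length) for j in range(i, length)]
def pvSubstrings (input_string : String) : List String :=
  let length : Int := PySem.Str.len input_string
  (PySem.List.pyRange 0 length 1).flatMap (fun i =>
    (PySem.List.pyRange i length 1).map (fun j =>
      PySem.Str.slice input_string (some i) (some (j + 1))))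

-- body of compare_words' inner loop: 'if s in dictionary.keys(): dictionary[s] += 1'
def pvIncr (d : PySem.Dict String Int) (s : String) : PySem.Dict String Int :=
  if d.contains s then d.insert s (d.getD s 0 + 1) else d

-- compare_words
def pvCompareWords (d : PySem.Dict String Int) (matrix : List (List String)) : PySem.Dict String Int :=
  matrix.foldl (fun d m => (pvSubstrings (PySem.Str.join "" m)).foldl pvIncr d) d

-- down_search's inner loop 'for m in matrix: y.append(m[i])'; none = the IndexError propagating
def pvDownCol {α : Type} (m : List (List α)) (i : Int) : Option (List α) :=
  match m with
  | [] => some []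
  | r :: rest =>
    match PySem.List.pyGet? r i with
    | none => none
    | some v => (pvDownCol rest i).map (v :: ·)

-- down_search's outer loop over range(len(matrix[0]))
def pvDownCols {α : Type} (m : List (List α)) (is : List Int) : Option (List (List α)) :=
  match is with
  | [] => some []
  | i :: rest =>
    match pvDownCol m i with
    | none => none
    | some col => (pvDownCols m rest).map (col :: ·)

-- down_search (polymorphic: Python applies it both to String cells and to Optional cells)
def pvDownSearch {α : Type} (m : List (List α)) : List (List α) :=
  match m with
  | [] => []  -- matrix[0] raises IndexError, caught: return []
  | m0 :: _ =>
    match pvDownCols m (PySem.List.pyRange 0 (m0.length : Int) 1) with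
    | some cols => cols
    | none => []  -- IndexError inside the loops, caught: return []

-- reverse: deepcopy, then each row reversed in place
def pvReverseRows (matrix : List (List String)) : List (List String) :=
  matrix.map (fun i => i.reverse)

-- get_rows
def pvGetRows (matrix : List (List String)) : List (List String) :=
  matrix.map (fun r => r.map (fun c => c))

-- diagonal_search; Python mixes None into the rows, modelled by lifting cells to Option
def pvDiagonalSearch (matrix : List (List String)) : List (List String) :=
  if matrix.length == 1 then matrix
  else
    let b : List (Option String) := List.replicate (matrix.length - 1) none
    let matrix2 : List (List (Option String)) :=
      (PySem.List.enumerate (pvGetRows matrix)).map (fun p =>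
        PySem.List.slice b none (some p.1) ++ p.2.map some ++ PySem.List.slice b (some p.1) none)
    (pvDownSearch matrix2).map (fun r => r.filterMap (fun c => c))

-- the body of search_loop's loop over the direction characters;
-- dictionary.update(compare_words(dictionary, X)) re-inserts the dict's own items
-- (same keys, same values, same order), i.e. it is the identity on the updated dict
def pvDirStep (matrix : List (List String)) (d : PySem.Dict String Int) (c : Char) : PySem.Dict String Int :=
    let d := if c == 'r' then pvCompareWords d matrix else d
    let d := if c == 'l' then pvCompareWords d (pvReverseRows matrix) else d
    let d := if c == 'd' then pvCompareWords d (pvDownSearch matrix) else d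
    let d := if c == 'u' then pvCompareWords d (pvReverseRows (pvDownSearch matrix)) else d
    let d := if c == 'w' then pvCompareWords d (pvReverseRows (pvDiagonalSearch matrix)) else d
    let d := if c == 'x' then pvCompareWords d (pvReverseRows (pvDiagonalSearch (pvReverseRows matrix))) else d
    let d := if c == 'y' then pvCompareWords d (pvDiagonalSearch (pvReverseRows matrix)) else d
    let d := if c == 'z' then pvCompareWords d (pvDiagonalSearch matrix) else d
    d

-- search_loop
def search_loop (dictionary : List (String × Int)) (matrix : List (List String)) (directions : String) : List (String × Int) :=
  let d0 := PySem.Dict.ofList dictionary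
  (directions.toList.foldl (pvDirStep matrix) d0).items

-- ===== PORT B =====
-- r[::-1]
def pvRevRow {α : Type} (r : List α) : List α :=
  (PySem.List.slice? r none none (-1)).getD []  -- step -1 ≠ 0, so always some

-- transpose; ragged input (a row shorter than the first) yields []
def pvTranspose {α : Type} [Inhabited α] (m : List (List α)) : List (List α) :=
  match m with
  | [] => []
  | m0 :: _ =>
    if m.any (fun r => r.length < m0.length) then []
    else (List.range m0.length).map (fun i => m.map (fun r => r.getD i default))
      -- r.getD i default ports r[i]: the guard ensures i < len(r)

-- diagonals via shifted rows; one-row matrices stay as is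
def pvDiagonals (m : List (List String)) : List (List String) :=
  if m.length == 1 then m
  else
    let pad : List (Option String) := List.replicate (m.length - 1) none
    let shifted : List (List (Option String)) :=
      (List.range m.length).map (fun i => pad.take i ++ (m.getD i []).map some ++ pad.drop i)
    (pvTranspose shifted).map (fun col => col.filterMap id)

-- rows_for
def pvRowsFor (matrix : List (List String)) (d : Char) : List (List String) :=
  if d == 'r' then matrix
  else if d == 'l' then matrix.map pvRevRow
  else if d == 'd' then pvTranspose matrix
  else if d == 'u' then (pvTranspose matrix).map pvRevRow
  else if d == 'w' then (pvDiagonals matrix).map pvRevRow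
  else if d == 'x' then (pvDiagonals (matrix.map pvRevRow)).map pvRevRow
  else if d == 'y' then pvDiagonals (matrix.map pvRevRow)
  else if d == 'z' then pvDiagonals matrix
  else []

-- count_occ
def pvCountOcc (w : String) (s : String) : Int :=
  (PySem.List.pyRange 0 (PySem.Str.len s - PySem.Str.len w + 1) 1).foldl
    (fun n i => if PySem.Str.slice s (some i) (some (i + PySem.Str.len w)) == w then n + 1 else n) 0

-- the body of B's update loop over the dictionary keys: dictionary[w] += sum(...)
def pvUpdateWord (rows : List String) (d : PySem.Dict String Int) (w : String) : PySem.Dict String Int :=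
  if w ≠ "" then d.insert w (d.getD w 0 + (rows.map (pvCountOcc w)).sum) else d

def search_loop_alt (dictionary : List (String × Int)) (matrix : List (List String)) (directions : String) : List (String × Int) :=
  let d0 := PySem.Dict.ofList dictionary
  let rows : List String :=
    directions.toList.flatMap (fun d => (pvRowsFor matrix d).map (fun r => PySem.Str.join "" r))
  (d0.keys.foldl (pvUpdateWord rows) d0).items

-- ===== PRECONDITION & SPEC =====
def Spec_search_loop (dictionary : List (String × Int)) (matrix : List (List String)) (directions : String) (out : List (String × Int)) : Prop := out = search_loop_alt dictionary matrix directions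
instance (dictionary : List (String × Int)) (matrix : List (List String)) (directions : String) (out : List (String × Int)) : Decidable (Spec_search_loop dictionary matrix directions out) := by unfold Spec_search_loop; infer_instance

-- ===== CLAIM (what is proved, stated in full; the proofs are below) =====
def Claim_equal_search_loop : Prop := ∀ (dictionary : List (String × Int)) (matrix : List (List String)) (directions : String), Dom_search_loop dictionary matrix directions → Spec_search_loop dictionary matrix directions (search_loop dictionary matrix directions)

-- ===== LEMMAS AND PROOFS =====


-- range bookkeeping
theorem pv_pyRange_natCast (a b : Nat) :
    PySem.List.pyRange (a : Int) (b : Int) 1 = (List.range (b - a)).map (fun k => ((a + k : Nat) : Int)) := by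
  rw [PySem.List.pyRange_of_pos _ _ one_pos]
  have h1 : ((b : Int) - a + 1 - 1) / 1 = (b : Int) - a := by norm_num
  have h2 : (if (a : Int) < b then (((b : Int) - a + 1 - 1) / 1).toNat else 0) = b - a := by
    rw [h1]; split <;> omega
  rw [h2]
  exact List.map_congr_left (fun k _ => by push_cast; ring)

theorem pv_pyRange_nonpos (b : Int) (h : b ≤ 0) : PySem.List.pyRange 0 b 1 = [] := by
  rw [PySem.List.pyRange_of_pos _ _ one_pos]
  have hnb : ¬ ((0 : Int) < b) := by omega
  simp [hnb]

-- view equalities: A's matrix builders equal B's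
theorem pv_revRow_eq {α : Type} (r : List α) : pvRevRow r = r.reverse := by
  simp [pvRevRow, PySem.List.slice?_none_none_neg_one]

theorem pv_reverseRows_eq (m : List (List String)) : pvReverseRows m = m.map pvRevRow := by
  simp [pvReverseRows, pv_revRow_eq]

theorem pv_downCol_some {α : Type} [Inhabited α] (m : List (List α)) (i : Nat)
    (h : ∀ r ∈ m, i < r.length) :
    pvDownCol m (i : Int) = some (m.map (fun r => r.getD i default)) := by
  induction m with
  | nil => rfl
  | cons r rest ih =>
    have hi : i < r.length := h r (List.mem_cons_self)
    rw [pvDownCol, PySem.List.pyGet?_natCast, List.getElem?_eq_getElem hi,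
      ih (fun r hr => h r (List.mem_cons_of_mem _ hr))]
    simp [List.getD_eq_getElem?_getD, List.getElem?_eq_getElem hi]

theorem pv_downCol_none {α : Type} (m : List (List α)) (i : Nat) (r : List α)
    (hr : r ∈ m) (hlen : r.length ≤ i) : pvDownCol m (i : Int) = none := by
  induction m with
  | nil => cases hr
  | cons x rest ih =>
    rw [pvDownCol]
    rcases List.mem_cons.mp hr with h1 | h1
    · subst h1
      rw [PySem.List.pyGet?_natCast, List.getElem?_eq_none hlen]
    · rw [ih h1]
      cases PySem.List.pyGet? x (i : Int) <;> rfl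

theorem pv_downCols_some {α : Type} (m : List (List α)) (is : List Int) (g : Int → List α)
    (h : ∀ i ∈ is, pvDownCol m i = some (g i)) : pvDownCols m is = some (is.map g) := by
  induction is with
  | nil => rfl
  | cons i rest ih =>
    rw [pvDownCols, h i (List.mem_cons_self), ih (fun j hj => h j (List.mem_cons_of_mem _ hj))]
    rfl

theorem pv_downCols_none {α : Type} (m : List (List α)) (is : List Int) (i : Int)
    (hi : i ∈ is) (h : pvDownCol m i = none) : pvDownCols m is = none := by
  induction is with
  | nil => cases hi
  | cons j rest ih =>
    rw [pvDownCols]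
    rcases List.mem_cons.mp hi with h1 | h1
    · subst h1
      rw [h]
    · rw [ih h1]
      cases pvDownCol m j <;> rfl

theorem pv_downSearch_eq_transpose {α : Type} [Inhabited α] (m : List (List α)) :
    pvDownSearch m = pvTranspose m := by
  cases m with
  | nil => rfl
  | cons m0 rest =>
    rw [pvDownSearch, pvTranspose]
    by_cases hr : ∃ r ∈ m0 :: rest, r.length < m0.length
    · obtain ⟨r, hrm, hlt⟩ := hr
      have hmem : ((r.length : Nat) : Int) ∈ PySem.List.pyRange 0 (m0.length : Int) 1 := by
        rw [PySem.List.mem_pyRange_iff_of_pos one_pos]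
        refine ⟨by omega, by exact_mod_cast hlt, one_dvd _⟩
      rw [pv_downCols_none _ _ _ hmem (pv_downCol_none _ _ r hrm le_rfl)]
      have : (m0 :: rest).any (fun r => r.length < m0.length) = true := by
        simp only [List.any_eq_true, decide_eq_true_eq]
        exact ⟨r, hrm, hlt⟩
      rw [if_pos this]
    · push Not at hr
      have hany : (m0 :: rest).any (fun r => r.length < m0.length) = false := by
        simp only [List.any_eq_false, decide_eq_true_eq]
        intro r hrm
        exact not_lt.mpr (hr r hrm)
      rw [if_neg (by simp [hany])]
      have hrange : PySem.List.pyRange (0 : Int) (m0.length : Int) 1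
          = (List.range m0.length).map (fun k => ((k : Nat) : Int)) := by
        have := pv_pyRange_natCast 0 m0.length
        simpa using this
      rw [hrange]
      have hcols : pvDownCols (m0 :: rest) ((List.range m0.length).map (fun k => ((k : Nat) : Int)))
          = some (((List.range m0.length).map (fun k => ((k : Nat) : Int))).map
              (fun i => (m0 :: rest).map (fun r => r.getD i.toNat default))) := by
        apply pv_downCols_some
        intro i hi
        obtain ⟨k, hk, rfl⟩ := List.mem_map.mp hi
        have hklt : ∀ r ∈ m0 :: rest, k < r.length := by
          intro r hrm
          exact lt_of_lt_of_le (List.mem_range.mp hk) (hr r hrm)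
        have := pv_downCol_some (m0 :: rest) k hklt
        rw [this]
        simp
      rw [hcols, List.map_map]
      congr 1

theorem pv_enumerate_map {α β : Type} (l : List α) (dflt : α) (f : Int × α → β) :
    (PySem.List.enumerate l).map f
      = (List.range l.length).map (fun (i : Nat) => f ((i : Int), l.getD i dflt)) := by
  have aux : ∀ (l : List α) (s : Nat),
      (PySem.List.enumerate l (s : Int)).map f
        = (List.range l.length).map (fun (i : Nat) => f (((s + i : Nat) : Int), l.getD i dflt)) := by
    intro l
    induction l with
    | nil => intro s; rfl
    | cons x xs ih =>
      intro s
      have hcons : PySem.List.enumerate (x :: xs) (s : Int)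
          = ((s : Int), x) :: PySem.List.enumerate xs ((s : Int) + 1) := rfl
      rw [hcons, List.map_cons, List.length_cons, List.range_succ_eq_map, List.map_cons,
        List.map_map]
      have hcast : ((s : Int) + 1) = ((s + 1 : Nat) : Int) := by push_cast; ring
      rw [hcast, ih (s + 1)]
      refine List.cons_eq_cons.mpr ⟨?_, ?_⟩
      · show f ((s : Int), x) = f (((s + 0 : Nat) : Int), (x :: xs).getD 0 dflt)
        norm_num
      · exact List.map_congr_left (fun k _ => by
          simp only [Function.comp, Nat.succ_eq_add_one, List.getD_cons_succ]
          congr 2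
          omega)
  have h0 := aux l 0
  simpa using h0

theorem pv_getRows_eq (m : List (List String)) : pvGetRows m = m := by
  simp [pvGetRows]

theorem pv_diagonalSearch_eq_diagonals (m : List (List String)) :
    pvDiagonalSearch m = pvDiagonals m := by
  by_cases h : (m.length == 1) = true
  · rw [pvDiagonalSearch, pvDiagonals, if_pos h, if_pos h]
  · rw [pvDiagonalSearch, pvDiagonals, if_neg h, if_neg h, pv_getRows_eq]
    dsimp only
    rw [pv_enumerate_map m ([] : List String), pv_downSearch_eq_transpose]
    have hm2 : (List.range m.length).map (fun (i : Nat) =>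
          PySem.List.slice (List.replicate (m.length - 1) (none : Option String)) none (some (i : Int))
          ++ (m.getD i []).map some
          ++ PySem.List.slice (List.replicate (m.length - 1) (none : Option String)) (some (i : Int)) none)
        = (List.range m.length).map (fun i =>
          (List.replicate (m.length - 1) (none : Option String)).take i
          ++ (m.getD i []).map some
          ++ (List.replicate (m.length - 1) (none : Option String)).drop i) :=
      List.map_congr_left (fun i _ => by
        rw [PySem.List.slice_to_natCast, PySem.List.slice_from_natCast])
    rw [hm2]
    rfl

theorem pv_dirStep_eq (matrix : List (List String)) (c : Char) (d : PySem.Dict String Int) :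
    pvDirStep matrix d c = pvCompareWords d (pvRowsFor matrix c) := by
  by_cases h1 : c = 'r'
  · subst h1; rfl
  by_cases h2 : c = 'l'
  · subst h2
    show pvCompareWords d (pvReverseRows matrix) = pvCompareWords d (matrix.map pvRevRow)
    rw [pv_reverseRows_eq]
  by_cases h3 : c = 'd'
  · subst h3
    show pvCompareWords d (pvDownSearch matrix) = pvCompareWords d (pvTranspose matrix)
    rw [pv_downSearch_eq_transpose]
  by_cases h4 : c = 'u'
  · subst h4
    show pvCompareWords d (pvReverseRows (pvDownSearch matrix))
        = pvCompareWords d ((pvTranspose matrix).map pvRevRow)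
    rw [pv_reverseRows_eq, pv_downSearch_eq_transpose]
  by_cases h5 : c = 'w'
  · subst h5
    show pvCompareWords d (pvReverseRows (pvDiagonalSearch matrix))
        = pvCompareWords d ((pvDiagonals matrix).map pvRevRow)
    rw [pv_reverseRows_eq, pv_diagonalSearch_eq_diagonals]
  by_cases h6 : c = 'x'
  · subst h6
    show pvCompareWords d (pvReverseRows (pvDiagonalSearch (pvReverseRows matrix)))
        = pvCompareWords d ((pvDiagonals (matrix.map pvRevRow)).map pvRevRow)
    rw [pv_reverseRows_eq, pv_reverseRows_eq, pv_diagonalSearch_eq_diagonals]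
  by_cases h7 : c = 'y'
  · subst h7
    show pvCompareWords d (pvDiagonalSearch (pvReverseRows matrix))
        = pvCompareWords d (pvDiagonals (matrix.map pvRevRow))
    rw [pv_reverseRows_eq, pv_diagonalSearch_eq_diagonals]
  by_cases h8 : c = 'z'
  · subst h8
    show pvCompareWords d (pvDiagonalSearch matrix) = pvCompareWords d (pvDiagonals matrix)
    rw [pv_diagonalSearch_eq_diagonals]
  · have hb1 : (c == 'r') = false := beq_eq_false_iff_ne.mpr h1
    have hb2 : (c == 'l') = false := beq_eq_false_iff_ne.mpr h2
    have hb3 : (c == 'd') = false := beq_eq_false_iff_ne.mpr h3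
    have hb4 : (c == 'u') = false := beq_eq_false_iff_ne.mpr h4
    have hb5 : (c == 'w') = false := beq_eq_false_iff_ne.mpr h5
    have hb6 : (c == 'x') = false := beq_eq_false_iff_ne.mpr h6
    have hb7 : (c == 'y') = false := beq_eq_false_iff_ne.mpr h7
    have hb8 : (c == 'z') = false := beq_eq_false_iff_ne.mpr h8
    rw [pvDirStep, pvRowsFor, hb1, hb2, hb3, hb4, hb5, hb6, hb7, hb8]
    simp only [Bool.false_eq_true, if_false]
    rfl

-- dictionary bookkeeping, A side
theorem pv_keys_incr (d : PySem.Dict String Int) (s : String) : (pvIncr d s).keys = d.keys := by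
  unfold pvIncr; split
  · exact PySem.Dict.keys_insert_of_contains d _ (by assumption)
  · rfl

theorem pv_contains_congr {κ ν : Type} [BEq κ] [LawfulBEq κ] [DecidableEq κ]
    (d d' : PySem.Dict κ ν) (h : d.keys = d'.keys) (k : κ) : d.contains k = d'.contains k := by
  rw [PySem.Dict.contains_eq_decide_mem_keys, PySem.Dict.contains_eq_decide_mem_keys, h]

theorem pv_keys_foldl_incr (ss : List String) (d : PySem.Dict String Int) :
    (ss.foldl pvIncr d).keys = d.keys := by
  induction ss generalizing d with
  | nil => rfl
  | cons s ss ih => rw [List.foldl_cons, ih, pv_keys_incr]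

theorem pv_getD_foldl_incr (ss : List String) (d : PySem.Dict String Int) (w : String) :
    (ss.foldl pvIncr d).getD w 0
      = d.getD w 0 + if d.contains w then (ss.count w : Int) else 0 := by
  induction ss generalizing d with
  | nil => simp
  | cons s ss ih =>
    rw [List.foldl_cons, ih]
    have hcont : (pvIncr d s).contains w = d.contains w :=
      pv_contains_congr _ _ (pv_keys_incr d s) w
    rw [hcont]
    by_cases hc : d.contains w = true
    · rw [if_pos hc, if_pos hc]
      by_cases hws : w = s
      · subst hws
        rw [pvIncr, if_pos hc, PySem.Dict.getD_insert_self]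
        rw [List.count_cons]
        push_cast
        simp
        ring
      · have : (pvIncr d s).getD w 0 = d.getD w 0 := by
          rw [pvIncr]; split
          · exact PySem.Dict.getD_insert_of_ne d _ _ hws
          · rfl
        rw [this, List.count_cons]
        have : (s == w) = false := by simp [Ne.symm hws]
        rw [this]
        push_cast
        ring
    · rw [if_neg hc, if_neg hc]
      have : (pvIncr d s).getD w 0 = d.getD w 0 := by
        rw [pvIncr]; split
        · rename_i hs
          exact PySem.Dict.getD_insert_of_ne d _ _ (fun h => hc (h ▸ hs))
        · rfl
      rw [this]

theorem pv_keys_compareWords (d : PySem.Dict String Int) (ms : List (List String)) :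
    (pvCompareWords d ms).keys = d.keys := by
  induction ms generalizing d with
  | nil => rfl
  | cons m ms ih =>
    have h : pvCompareWords d (m :: ms)
        = pvCompareWords ((pvSubstrings (PySem.Str.join "" m)).foldl pvIncr d) ms := rfl
    rw [h, ih, pv_keys_foldl_incr]

-- the total count A adds to key w while scanning the matrices of one direction
def pvACnt (w : String) (ms : List (List String)) : Int :=
  (ms.map (fun m => ((pvSubstrings (PySem.Str.join "" m)).count w : Int))).sum

theorem pv_getD_compareWords (d : PySem.Dict String Int) (ms : List (List String)) (w : String) :
    (pvCompareWords d ms).getD w 0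
      = d.getD w 0 + if d.contains w then pvACnt w ms else 0 := by
  induction ms generalizing d with
  | nil => simp [pvCompareWords, pvACnt]
  | cons m ms ih =>
    have hstep : pvCompareWords d (m :: ms)
        = pvCompareWords ((pvSubstrings (PySem.Str.join "" m)).foldl pvIncr d) ms := rfl
    rw [hstep, ih, pv_getD_foldl_incr,
      pv_contains_congr _ d (pv_keys_foldl_incr (pvSubstrings (PySem.Str.join "" m)) d) w]
    have hacnt : pvACnt w (m :: ms)
        = ((pvSubstrings (PySem.Str.join "" m)).count w : Int) + pvACnt w ms := by
      rw [pvACnt, pvACnt, List.map_cons, List.sum_cons]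
    rw [hacnt]
    by_cases hc : d.contains w = true
    · rw [if_pos hc, if_pos hc, if_pos hc]
      ring
    · rw [if_neg hc, if_neg hc, if_neg hc]
      ring

theorem pv_keys_dirFold (matrix : List (List String)) (cs : List Char) (d : PySem.Dict String Int) :
    (cs.foldl (pvDirStep matrix) d).keys = d.keys := by
  induction cs generalizing d with
  | nil => rfl
  | cons c cs ih => rw [List.foldl_cons, ih, pv_dirStep_eq, pv_keys_compareWords]

theorem pv_getD_dirFold (matrix : List (List String)) (cs : List Char) (d : PySem.Dict String Int)
    (w : String) :
    (cs.foldl (pvDirStep matrix) d).getD w 0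
      = d.getD w 0
        + if d.contains w then (cs.map (fun c => pvACnt w (pvRowsFor matrix c))).sum else 0 := by
  induction cs generalizing d with
  | nil => simp
  | cons c cs ih =>
    rw [List.foldl_cons, pv_dirStep_eq, ih, pv_getD_compareWords,
      pv_contains_congr _ d (pv_keys_compareWords d (pvRowsFor matrix c)) w,
      List.map_cons, List.sum_cons]
    by_cases hc : d.contains w = true
    · rw [if_pos hc, if_pos hc, if_pos hc]
      ring
    · rw [if_neg hc, if_neg hc, if_neg hc]
      ring

-- dictionary bookkeeping, B side
theorem pv_keys_updateWord (rows : List String) (d : PySem.Dict String Int) (w : String)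
    (h : w ∈ d.keys) : (pvUpdateWord rows d w).keys = d.keys := by
  unfold pvUpdateWord; split
  · exact PySem.Dict.keys_insert_of_contains d _ ((PySem.Dict.contains_iff_mem_keys d w).mpr h)
  · rfl

theorem pv_keys_bFold (rows : List String) (ks : List String) (d : PySem.Dict String Int)
    (h : ∀ u ∈ ks, u ∈ d.keys) : (ks.foldl (pvUpdateWord rows) d).keys = d.keys := by
  induction ks generalizing d with
  | nil => rfl
  | cons k ks ih =>
    have hk := pv_keys_updateWord rows d k (h k (List.mem_cons_self))
    rw [List.foldl_cons, ih _ (fun u hu => by rw [hk]; exact h u (List.mem_cons_of_mem _ hu)), hk]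

theorem pv_getD_bFold_notMem (rows : List String) (ks : List String) (d : PySem.Dict String Int)
    (w : String) (h : w ∉ ks) : (ks.foldl (pvUpdateWord rows) d).getD w 0 = d.getD w 0 := by
  induction ks generalizing d with
  | nil => rfl
  | cons k ks ih =>
    have hwk : w ≠ k := fun hh => h (hh ▸ List.mem_cons_self)
    rw [List.foldl_cons, ih _ (fun hh => h (List.mem_cons_of_mem _ hh))]
    rw [pvUpdateWord]; split
    · exact PySem.Dict.getD_insert_of_ne d _ _ hwk
    · rfl

theorem pv_getD_bFold (rows : List String) (ks : List String) (d : PySem.Dict String Int)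
    (w : String) (hnd : ks.Nodup) (hmem : ∀ u ∈ ks, u ∈ d.keys) (hw : w ∈ ks) :
    (ks.foldl (pvUpdateWord rows) d).getD w 0
      = d.getD w 0 + if w ≠ "" then (rows.map (pvCountOcc w)).sum else 0 := by
  induction ks generalizing d with
  | nil => cases hw
  | cons k ks ih =>
    rw [List.foldl_cons]
    have hkk : k ∈ d.keys := hmem k (List.mem_cons_self)
    have hkeys : (pvUpdateWord rows d k).keys = d.keys := pv_keys_updateWord rows d k hkk
    rcases List.mem_cons.mp hw with h1 | h1
    · subst h1
      have hnin : w ∉ ks := (List.nodup_cons.mp hnd).1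
      rw [pv_getD_bFold_notMem rows ks _ w hnin]
      rw [pvUpdateWord]
      split
      · rw [PySem.Dict.getD_insert_self]
      · ring
    · have hwk : w ≠ k := by
        intro hh
        subst hh
        exact (List.nodup_cons.mp hnd).1 h1
      have hgd : (pvUpdateWord rows d k).getD w 0 = d.getD w 0 := by
        rw [pvUpdateWord]
        split
        · exact PySem.Dict.getD_insert_of_ne d _ _ hwk
        · rfl
      rw [ih _ (List.nodup_cons.mp hnd).2
        (fun u hu => hkeys ▸ hmem u (List.mem_cons_of_mem _ hu)) h1, hgd]

-- the substring-count equivalence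
theorem pv_pyRange_zero (n : Nat) :
    PySem.List.pyRange 0 (n : Int) 1 = (List.range n).map (Nat.cast : Nat → Int) := by
  have h := pv_pyRange_natCast 0 n
  simp only [Nat.cast_zero, Nat.sub_zero] at h
  rw [h]
  exact List.map_congr_left (fun k _ => by simp)

theorem pv_sum_map_ite_prop {α : Type} (l : List α) (p : α → Prop) [DecidablePred p] :
    (l.map (fun x => if p x then 1 else 0)).sum = l.countP (fun x => decide (p x)) := by
  induction l with
  | nil => rfl
  | cons x l ih =>
    by_cases h : p x <;> simp [h, ih, Nat.add_comm]

theorem pv_slice_beq (t w : String) (a b : Nat) :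
    (PySem.Str.slice t (some (a : Int)) (some (b : Int)) == w)
      = decide ((t.toList.drop a).take (b - a) = w.toList) := by
  apply Bool.eq_iff_iff.mpr
  rw [beq_iff_eq, decide_eq_true_eq]
  rw [← String.toList_inj, PySem.Str.toList_slice, PySem.Chars.slice_eq_listSlice,
    PySem.List.slice_natCast]

theorem pv_inner_count (s wl : List Char) (n : Nat) (hn : n = s.length) :
    List.countP (fun j => decide (s.take (j + 1) = wl)) (List.range n)
      = if wl.length ≤ n ∧ s.take wl.length = wl ∧ wl ≠ [] then 1 else 0 := by
  by_cases hC : s.take wl.length = wl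
  · have key : ∀ j ∈ List.range n,
        (decide (s.take (j + 1) = wl) = true) ↔ ((j + 1 == wl.length) = true) := by
      intro j hj
      have hjn : j < n := List.mem_range.mp hj
      simp only [decide_eq_true_eq, beq_iff_eq]
      constructor
      · intro hl
        have hlen := congrArg List.length hl
        rw [List.length_take] at hlen
        omega
      · intro hl
        rw [hl]
        exact hC
    rw [List.countP_congr key]
    rcases Nat.eq_zero_or_pos wl.length with h0 | hpos
    · have hwl : wl = [] := List.eq_nil_of_length_eq_zero h0
      rw [if_neg (by simp [hwl])]
      apply List.countP_eq_zero.mpr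
      intro j hj
      simp only [beq_iff_eq]
      omega
    · have hne : wl ≠ [] := by
        intro h
        rw [h] at hpos
        simp at hpos
      have hcnt : List.countP (fun j => j + 1 == wl.length) (List.range n)
          = List.count (wl.length - 1) (List.range n) := by
        rw [List.count_eq_countP]
        apply List.countP_congr
        intro j _
        simp only [beq_iff_eq]
        omega
      rw [hcnt, List.count_range]
      by_cases hle : wl.length ≤ n
      · rw [if_pos (by omega), if_pos ⟨hle, hC, hne⟩]
      · rw [if_neg (by omega), if_neg (by tauto)]
  · rw [if_neg (by tauto)]
    apply List.countP_eq_zero.mpr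
    intro j hj
    have hjn : j < n := List.mem_range.mp hj
    simp only [decide_eq_true_eq]
    intro hl
    apply hC
    have hlen := congrArg List.length hl
    rw [List.length_take] at hlen
    have : wl.length = j + 1 := by omega
    rw [this]
    exact hl

theorem pv_count_substrings_core (t w : String) :
    (pvSubstrings t).count w
      = List.countP (fun i => decide (w.toList.length ≤ t.toList.length - i ∧
          (t.toList.drop i).take w.toList.length = w.toList ∧ w.toList ≠ []))
          (List.range t.toList.length) := by
  simp only [pvSubstrings, PySem.Str.len_eq]
  rw [pv_pyRange_zero, List.count_eq_countP, List.countP_flatMap, List.map_map]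
  have per : ∀ k ∈ List.range t.toList.length,
      ((List.countP (fun x => x == w) ∘
        (fun i => (PySem.List.pyRange i (t.toList.length : Int) 1).map
          (fun j => PySem.Str.slice t (some i) (some (j + 1))))) ∘ (Nat.cast : Nat → Int)) k
        = if w.toList.length ≤ t.toList.length - k ∧
            (t.toList.drop k).take w.toList.length = w.toList ∧ w.toList ≠ [] then 1 else 0 := by
    intro k _
    simp only [Function.comp]
    rw [pv_pyRange_natCast k t.toList.length, List.countP_map, List.countP_map]
    have hcg : ∀ j ∈ List.range (t.toList.length - k),
        ((((fun x => x == w) ∘ fun j => PySem.Str.slice t (some (k : Int)) (some (j + 1))) ∘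
          (fun j : Nat => ((k + j : Nat) : Int))) j = true)
          ↔ (decide ((t.toList.drop k).take (j + 1) = w.toList) = true) := by
      intro j _
      simp only [Function.comp]
      have hc : ((k + j : Nat) : Int) + 1 = ((k + j + 1 : Nat) : Int) := by push_cast; ring
      rw [hc, pv_slice_beq t w k (k + j + 1)]
      have : k + j + 1 - k = j + 1 := by omega
      rw [this]
    rw [List.countP_congr hcg]
    exact pv_inner_count (t.toList.drop k) w.toList (t.toList.length - k)
      (by rw [List.length_drop])
  rw [List.map_congr_left per]
  exact pv_sum_map_ite_prop _ _

theorem pv_count_substrings_empty (t : String) : (pvSubstrings t).count "" = 0 := by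
  rw [pv_count_substrings_core]
  apply List.countP_eq_zero.mpr
  intro a _
  simp

theorem pv_count_substrings (w t : String) (hw : w ≠ "") :
    ((pvSubstrings t).count w : Int) = pvCountOcc w t := by
  have hwl : w.toList ≠ [] := by
    intro h
    apply hw
    apply String.toList_inj.mp
    rw [h]
    rfl
  have hW1 : 1 ≤ w.toList.length := by
    cases hL : w.toList with
    | nil => exact absurd hL hwl
    | cons a l => simp
  rw [pv_count_substrings_core]
  unfold pvCountOcc
  rw [PySem.Str.len_eq, PySem.Str.len_eq]
  by_cases hWL : w.toList.length ≤ t.toList.length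
  · have hcast : (t.toList.length : Int) - (w.toList.length : Int) + 1
        = ((t.toList.length - w.toList.length + 1 : Nat) : Int) := by push_cast; omega
    rw [hcast, pv_pyRange_zero, PySem.List.foldl_if_add_one, List.countP_map]
    have hB : ∀ k ∈ List.range (t.toList.length - w.toList.length + 1),
        (((fun i => PySem.Str.slice t (some i) (some (i + (w.toList.length : Int))) == w) ∘
          (Nat.cast : Nat → Int)) k = true)
          ↔ (decide ((t.toList.drop k).take w.toList.length = w.toList) = true) := by
      intro k _
      simp only [Function.comp]
      have hc : (k : Int) + (w.toList.length : Int) = ((k + w.toList.length : Nat) : Int) := by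
        push_cast; ring
      rw [hc, pv_slice_beq t w k (k + w.toList.length)]
      have : k + w.toList.length - k = w.toList.length := by omega
      rw [this]
    rw [List.countP_congr hB]
    have hsplit : t.toList.length
        = (t.toList.length - w.toList.length + 1) + (w.toList.length - 1) := by omega
    have hrangeEq : List.range t.toList.length
        = List.range (t.toList.length - w.toList.length + 1)
          ++ (List.range (w.toList.length - 1)).map
              (fun x => t.toList.length - w.toList.length + 1 + x) := by
      conv_lhs => rw [hsplit]
      exact List.range_add
    rw [hrangeEq, List.countP_append, List.countP_map]
    have h2 : List.countP ((fun i => decide (w.toList.length ≤ t.toList.length - i ∧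
          (t.toList.drop i).take w.toList.length = w.toList ∧ w.toList ≠ [])) ∘
          (fun x => t.toList.length - w.toList.length + 1 + x))
        (List.range (w.toList.length - 1)) = 0 := by
      apply List.countP_eq_zero.mpr
      intro x _
      simp only [Function.comp, decide_eq_true_eq]
      intro hcond
      omega
    rw [h2]
    have h1 : ∀ i ∈ List.range (t.toList.length - w.toList.length + 1),
        ((fun i => decide (w.toList.length ≤ t.toList.length - i ∧
          (t.toList.drop i).take w.toList.length = w.toList ∧ w.toList ≠ [])) i = true)
          ↔ (decide ((t.toList.drop i).take w.toList.length = w.toList) = true) := by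
      intro i hi
      have hlt : i < t.toList.length - w.toList.length + 1 := List.mem_range.mp hi
      simp only [decide_eq_true_eq]
      constructor
      · intro hcond
        exact hcond.2.1
      · intro hq
        exact ⟨by omega, hq, hwl⟩
    rw [List.countP_congr h1]
    push_cast
    ring
  · have hneg : (t.toList.length : Int) - (w.toList.length : Int) + 1 ≤ 0 := by omega
    rw [pv_pyRange_nonpos _ hneg]
    have h0 : List.countP (fun i => decide (w.toList.length ≤ t.toList.length - i ∧
          (t.toList.drop i).take w.toList.length = w.toList ∧ w.toList ≠ []))
        (List.range t.toList.length) = 0 := by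
      apply List.countP_eq_zero.mpr
      intro i _
      simp only [decide_eq_true_eq]
      intro hcond
      omega
    rw [h0]
    rfl

theorem pv_sum_flatMap {α : Type} (l : List α) (f : α → List Int) :
    ((l.flatMap f).sum : Int) = (l.map (fun a => (f a).sum)).sum := by
  induction l with
  | nil => rfl
  | cons a l ih => simp [List.flatMap_cons, List.sum_append, ih]

-- A's total for a key equals B's total for that key
theorem pv_totals_eq (matrix : List (List String)) (cs : List Char) (w : String) :
    (cs.map (fun c => pvACnt w (pvRowsFor matrix c))).sum
      = if w ≠ "" then
          (((cs.flatMap (fun c => (pvRowsFor matrix c).map (fun r => PySem.Str.join "" r))).map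
            (pvCountOcc w)).sum)
        else 0 := by
  by_cases hw : w = ""
  · subst hw
    rw [if_neg (by simp)]
    apply List.sum_eq_zero
    intro x hx
    obtain ⟨c, _, rfl⟩ := List.mem_map.mp hx
    apply List.sum_eq_zero
    intro y hy
    obtain ⟨mm, _, rfl⟩ := List.mem_map.mp hy
    rw [pv_count_substrings_empty]
    rfl
  · rw [if_pos hw, List.map_flatMap, pv_sum_flatMap]
    apply congrArg List.sum
    apply List.map_congr_left
    intro c _
    rw [List.map_map]
    apply congrArg List.sum
    apply List.map_congr_left
    intro mm _
    exact pv_count_substrings w (PySem.Str.join "" mm) hw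

theorem pv_main : ∀ (dictionary : List (String × Int)) (matrix : List (List String)) (directions : String), search_loop dictionary matrix directions = search_loop_alt dictionary matrix directions := by
  intro dictionary matrix directions
  show (directions.toList.foldl (pvDirStep matrix) (PySem.Dict.ofList dictionary)).items
      = ((PySem.Dict.ofList dictionary).keys.foldl
          (pvUpdateWord (directions.toList.flatMap
            (fun d => (pvRowsFor matrix d).map (fun r => PySem.Str.join "" r))))
          (PySem.Dict.ofList dictionary)).items
  have hnd0 : (PySem.Dict.ofList dictionary).keys.Nodup := PySem.Dict.nodup_keys_ofList dictionary
  have hkA : (directions.toList.foldl (pvDirStep matrix) (PySem.Dict.ofList dictionary)).keys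
      = (PySem.Dict.ofList dictionary).keys := pv_keys_dirFold matrix _ _
  have hkB : ((PySem.Dict.ofList dictionary).keys.foldl
      (pvUpdateWord (directions.toList.flatMap
        (fun d => (pvRowsFor matrix d).map (fun r => PySem.Str.join "" r))))
      (PySem.Dict.ofList dictionary)).keys = (PySem.Dict.ofList dictionary).keys :=
    pv_keys_bFold _ _ _ (fun u hu => hu)
  rw [PySem.Dict.items_eq_map_keys _ (by rw [hkA]; exact hnd0) 0,
    PySem.Dict.items_eq_map_keys _ (by rw [hkB]; exact hnd0) 0, hkA, hkB]
  apply List.map_congr_left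
  intro k hk
  simp only [Prod.mk.injEq, true_and]
  rw [pv_getD_dirFold, pv_getD_bFold _ _ _ _ hnd0 (fun u hu => hu) hk]
  have hcont : (PySem.Dict.ofList dictionary).contains k = true :=
    (PySem.Dict.contains_iff_mem_keys _ _).mpr hk
  rw [if_pos hcont, pv_totals_eq]

-- ===== VERDICT (by name: the statement is the Claim_ definition above) =====
theorem search_loop_spec : Claim_equal_search_loop := by
  intro dictionary matrix directions _
  unfold Spec_search_loop
  exact pv_main dictionary matrix directions
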